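-- pv_equiv track=rewrite | github.com/FlexonaFFt/CodeRunYandex | RunSeason2/backend/438.crystals/crystals3.py | min_transformations
-- ===== SOURCE A (Python) =====
-- def get_character_blocks(s):
--     if not s:
--         return [], []
--
--     chars = [s[0]]
--     counts = [1]
--
--     for char in s[1:]:
--         if char == chars[-1]:
--             counts[-1] += 1
--         else:
--             chars.append(char)
--             counts.append(1)
--
--     return chars, counts
--
-- def min_transformations(s1, s2, s3):
--     chars1, counts1 = get_character_blocks(s1)
--     chars2, counts2 = get_character_blocks(s2)
--     chars3, counts3 = get_character_blocks(s3)
--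
--     if chars1 != chars2 or chars1 != chars3:
--         return "IMPOSSIBLE"
--
--     total_transformations = 0
--     result = []
--
--     for i in range(len(chars1)):
--         count1, count2, count3 = counts1[i], counts2[i], counts3[i]
--         target_count = sorted([count1, count2, count3])[1]
--
--         total_transformations += abs(count1 - target_count)
--         total_transformations += abs(count2 - target_count)
--         total_transformations += abs(count3 - target_count)
--
--         result.append(chars1[i] * target_count)
--
--     return ''.join(result)
-- ===== SOURCE B (Python) =====
-- def min_transformations(s1, s2, s3):
--     # Fused single pass: walk all three strings with one pointer each,
--     # consuming one run per step; no block lists are built.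
--     i = j = k = 0
--     parts = []
--     while i < len(s1) and j < len(s2) and k < len(s3):
--         c = s1[i]
--         if s2[j] != c or s3[k] != c:
--             return "IMPOSSIBLE"
--         i2 = i
--         while i2 < len(s1) and s1[i2] == c:
--             i2 += 1
--         j2 = j
--         while j2 < len(s2) and s2[j2] == c:
--             j2 += 1
--         k2 = k
--         while k2 < len(s3) and s3[k2] == c:
--             k2 += 1
--         n1, n2, n3 = i2 - i, j2 - j, k2 - k
--         m = max(min(n1, n2), min(max(n1, n2), n3))
--         parts.append(c * m)
--         i, j, k = i2, j2, k2
--     if i < len(s1) or j < len(s2) or k < len(s3):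
--         return "IMPOSSIBLE"
--     return ''.join(parts)
-- ===== Notes on version B (the rewrite author's own statement) =====
-- stated objective: alternative
-- what changed: Instead of building per-string parallel chars/counts block lists and then index-looping with a sorted() median and an unused transformation counter, B walks the three strings in one fused three-pointer pass, consuming one run from each per step, aborting early on any mismatch, and takes the median of three counts with a min/max formula; no intermediate block lists are built.
import Mathlib
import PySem

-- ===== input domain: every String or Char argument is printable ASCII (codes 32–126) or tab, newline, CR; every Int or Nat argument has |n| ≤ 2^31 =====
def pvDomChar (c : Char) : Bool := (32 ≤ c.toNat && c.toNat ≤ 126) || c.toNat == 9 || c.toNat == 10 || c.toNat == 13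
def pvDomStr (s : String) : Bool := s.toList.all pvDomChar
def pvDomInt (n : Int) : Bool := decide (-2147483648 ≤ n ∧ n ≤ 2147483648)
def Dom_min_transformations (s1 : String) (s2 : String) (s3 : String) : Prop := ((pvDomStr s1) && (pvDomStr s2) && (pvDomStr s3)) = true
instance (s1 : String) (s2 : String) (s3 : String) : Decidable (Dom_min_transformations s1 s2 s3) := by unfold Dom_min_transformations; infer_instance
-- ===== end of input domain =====

-- B replaces A's block-list construction + indexed median loop by one fused
-- three-pointer pass consuming a run from each string per step (objective: alternative).

-- ===== PORT A =====
-- transliteration of get_character_blocks: fold over s[1:], appending or bumping the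
-- last count.  chars/counts are provably nonempty at every step, so Python's
-- chars[-1] / counts[-1] are exactly getLastD here.
def get_character_blocks (s : String) : List Char × List Int :=
  match s.toList with
  | [] => ([], [])
  | c :: rest =>
    rest.foldl (fun (st : List Char × List Int) ch =>
      if ch == st.1.getLastD ' ' then (st.1, st.2.dropLast ++ [st.2.getLastD 0 + 1])
      else (st.1 ++ [ch], st.2 ++ [1])) ([c], [1])

-- main loop of A: total_transformations is computed and dropped, exactly as A drops it.
def min_transformations (s1 : String) (s2 : String) (s3 : String) : String :=
  let b1 := get_character_blocks s1
  let b2 := get_character_blocks s2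
  let b3 := get_character_blocks s3
  if b1.1 ≠ b2.1 ∨ b1.1 ≠ b3.1 then "IMPOSSIBLE"
  else
    -- for i in range(len(chars1)): indices are in range, so getD is Python's xs[i]
    let result := (List.range b1.1.length).foldl (fun (acc : List String) i =>
      let count1 := b1.2.getD i 0
      let count2 := b2.2.getD i 0
      let count3 := b3.2.getD i 0
      let target := (PySem.List.sorted [count1, count2, count3] (fun x => x) false).getD 1 0
      acc ++ [String.mk (PySem.List.pyRepeat [b1.1.getD i ' '] target)]) []
    PySem.Str.join "" result

-- ===== PORT B =====
-- while i2 < len(s) and s[i2] == c: i2 += 1  — run length at the current suffix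
def runLen (c : Char) : List Char → Nat
  | [] => 0
  | x :: t => if x = c then runLen c t + 1 else 0

-- the suffix left after that inner while loop
def dropRun (c : Char) : List Char → List Char
  | [] => []
  | x :: t => if x = c then dropRun c t else x :: t

theorem length_dropRun_le (c : Char) (l : List Char) : (dropRun c l).length ≤ l.length := by
  induction l with
  | nil => simp [dropRun]
  | cons x t ih => simp only [dropRun]; split <;> simp <;> omega

-- the outer while loop of Source B: the pointers i,j,k are represented by the suffixes
def goB (l1 l2 l3 : List Char) (parts : List String) : String :=
  match l1, l2, l3 with
  | c :: t1, x2 :: t2, x3 :: t3 =>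
    if x2 ≠ c ∨ x3 ≠ c then "IMPOSSIBLE"
    else
      -- n1, n2, n3 = run lengths at the three pointers; m = their median (inlined)
      goB (dropRun c (c :: t1)) (dropRun c (x2 :: t2)) (dropRun c (x3 :: t3))
        (parts ++ [String.mk (List.replicate
          (max (min (runLen c (c :: t1)) (runLen c (x2 :: t2)))
               (min (max (runLen c (c :: t1)) (runLen c (x2 :: t2))) (runLen c (x3 :: t3)))) c)])
  | l1, l2, l3 =>
    if l1 ≠ [] ∨ l2 ≠ [] ∨ l3 ≠ [] then "IMPOSSIBLE" else PySem.Str.join "" parts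
termination_by l1.length
decreasing_by
  simp only [dropRun, if_pos rfl]
  have := length_dropRun_le c t1
  simp; omega

def min_transformations_alt (s1 : String) (s2 : String) (s3 : String) : String :=
  goB s1.toList s2.toList s3.toList []

-- ===== PRECONDITION & SPEC =====
def Spec_min_transformations (s1 : String) (s2 : String) (s3 : String) (out : String) : Prop := out = min_transformations_alt s1 s2 s3
instance (s1 : String) (s2 : String) (s3 : String) (out : String) : Decidable (Spec_min_transformations s1 s2 s3 out) := by unfold Spec_min_transformations; infer_instance

-- ===== CLAIM (what is proved, stated in full; the proofs are below) =====
def Claim_equal_min_transformations : Prop := ∀ (s1 : String) (s2 : String) (s3 : String), Dom_min_transformations s1 s2 s3 → Spec_min_transformations s1 s2 s3 (min_transformations s1 s2 s3)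

-- ===== LEMMAS AND PROOFS =====

-- reference run-length encoding both ports are reduced to
def rleAux (c : Char) (n : Nat) : List Char → List (Char × Nat)
  | [] => [(c, n)]
  | x :: t => if x = c then rleAux c (n + 1) t else (c, n) :: rleAux x 1 t

def rle : List Char → List (Char × Nat)
  | [] => []
  | c :: t => rleAux c 1 t

def med3 (a b c : Nat) : Nat := max (min a b) (min (max a b) c)

def medParts (b1 b2 b3 : List (Char × Nat)) : List String :=
  (b1.zip (b2.zip b3)).map (fun pqr =>
    String.mk (List.replicate (med3 pqr.1.2 pqr.2.1.2 pqr.2.2.2) pqr.1.1))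

theorem rleAux_eq (c : Char) (n : Nat) (l : List Char) :
    rleAux c n l = (c, n + runLen c l) :: rle (dropRun c l) := by
  induction l generalizing c n with
  | nil => simp [rleAux, runLen, dropRun, rle]
  | cons x t ih =>
    simp only [rleAux, runLen, dropRun]
    by_cases h : x = c
    · simp only [if_pos h, ih]
      congr 2
      omega
    · simp [h, rle]

theorem rle_cons (c : Char) (t : List Char) :
    rle (c :: t) = (c, runLen c t + 1) :: rle (dropRun c t) := by
  show rleAux c 1 t = _
  rw [rleAux_eq]
  congr 2
  omega

theorem rle_eq_nil_iff (l : List Char) : rle l = [] ↔ l = [] := by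
  cases l with
  | nil => simp [rle]
  | cons c t => rw [rle_cons]; simp

theorem runLen_cons_self (c : Char) (t : List Char) :
    runLen c (c :: t) = runLen c t + 1 := by simp [runLen]

theorem dropRun_cons_self (c : Char) (t : List Char) :
    dropRun c (c :: t) = dropRun c t := by simp [dropRun]

-- invariant of A's block-building fold
theorem foldGcb (l : List Char) (pre : List Char) (pres : List Int) (c : Char) (n : Nat) :
    l.foldl (fun (st : List Char × List Int) ch =>
      if ch == st.1.getLastD ' ' then (st.1, st.2.dropLast ++ [st.2.getLastD 0 + 1])
      else (st.1 ++ [ch], st.2 ++ [1])) (pre ++ [c], pres ++ [(n : Int)]) =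
    (pre ++ (rleAux c n l).map Prod.fst, pres ++ (rleAux c n l).map (fun p => (p.2 : Int))) := by
  induction l generalizing pre pres c n with
  | nil => simp [rleAux]
  | cons x t ih =>
    simp only [List.foldl_cons, List.getLastD_concat, List.dropLast_concat, rleAux]
    by_cases h : x = c
    · simp only [h, beq_self_eq_true, if_pos]
      have hcast : (n : Int) + 1 = ((n + 1 : Nat) : Int) := by push_cast; ring
      rw [hcast, ih]
    · have hb : (x == c) = false := by simp [h]
      have h2 := ih (pre ++ [c]) (pres ++ [(n : Int)]) x 1
      simp only [Nat.cast_one] at h2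
      simp only [hb, Bool.false_eq_true, if_false, if_neg h]
      rw [h2]
      simp

-- gcb characterization: A's two parallel lists are the unzip of rle
theorem gcb_eq (s : String) :
    get_character_blocks s =
      ((rle s.toList).map Prod.fst, (rle s.toList).map (fun p => (p.2 : Int))) := by
  cases h : s.toList with
  | nil => simp [get_character_blocks, h, rle]
  | cons c rest =>
    simp only [get_character_blocks, h]
    rw [show rle (c :: rest) = rleAux c 1 rest from rfl]
    have h1 := foldGcb rest [] [] c 1
    simp only [List.nil_append, Nat.cast_one] at h1
    exact h1

-- sorted([a,b,c])[1] is the min/max median formula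
set_option maxRecDepth 8192 in
theorem sorted_mid (a b c : Int) :
    (PySem.List.sorted [a, b, c] (fun x => x) false).getD 1 0 =
      max (min a b) (min (max a b) c) := by
  by_cases h1 : b < a <;> by_cases h2 : c < a <;> by_cases h3 : c < b <;>
    · simp only [PySem.List.sorted_eq_foldl_insertBy, List.foldl_cons, List.foldl_nil,
        PySem.List.insertBy, h1, h2, h3, decide_true, decide_false, if_true, if_false,
        Bool.false_eq_true, List.getD_cons_succ, List.getD_cons_zero]
      omega

-- goB characterization
theorem goB_eq (l1 l2 l3 : List Char) (parts : List String) :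
    goB l1 l2 l3 parts =
      if (rle l1).map Prod.fst = (rle l2).map Prod.fst ∧
         (rle l1).map Prod.fst = (rle l3).map Prod.fst
      then PySem.Str.join "" (parts ++ medParts (rle l1) (rle l2) (rle l3))
      else "IMPOSSIBLE" := by
  fun_induction goB l1 l2 l3 parts with
  | case1 parts c t1 x2 t2 x3 t3 hne =>
    rw [if_neg]
    rintro ⟨hc2, hc3⟩
    rw [rle_cons c t1] at hc2 hc3
    rw [rle_cons x2 t2] at hc2
    rw [rle_cons x3 t3] at hc3
    simp only [List.map_cons, List.cons.injEq] at hc2 hc3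
    rcases hne with hh | hh
    · exact hh hc2.1.symm
    · exact hh hc3.1.symm
  | case2 parts c t1 x2 t2 x3 t3 h ih =>
    simp only [ne_eq, not_or, not_not] at h
    obtain ⟨h2, h3⟩ := h
    subst x2; subst x3
    rw [ih]
    rw [rle_cons c t1, rle_cons c t2, rle_cons c t3]
    simp only [dropRun_cons_self, List.map_cons, List.cons.injEq, true_and]
    by_cases hc : ((rle (dropRun c t1)).map Prod.fst = (rle (dropRun c t2)).map Prod.fst ∧
        (rle (dropRun c t1)).map Prod.fst = (rle (dropRun c t3)).map Prod.fst)
    · rw [if_pos hc, if_pos hc]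
      simp [medParts, med3, runLen_cons_self, List.append_assoc]
    · rw [if_neg hc, if_neg hc]
  | case3 parts l1 l2 l3 hnc h =>
    rw [if_neg]
    rintro ⟨hc2, hc3⟩
    cases l1 with
    | nil =>
      have hz : rle ([] : List Char) = [] := rfl
      rw [hz] at hc2 hc3
      simp only [List.map_nil] at hc2 hc3
      have hl2 : l2 = [] := (rle_eq_nil_iff l2).mp (List.map_eq_nil_iff.mp hc2.symm)
      have hl3 : l3 = [] := (rle_eq_nil_iff l3).mp (List.map_eq_nil_iff.mp hc3.symm)
      rcases h with hh | hh | hh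
      · exact hh rfl
      · exact hh hl2
      · exact hh hl3
    | cons c t1 =>
      cases l2 with
      | nil => rw [rle_cons] at hc2; simp [rle] at hc2
      | cons x2 t2 =>
        cases l3 with
        | nil => rw [rle_cons] at hc3; simp [rle] at hc3
        | cons x3 t3 => exact hnc c t1 x2 t2 x3 t3 rfl rfl rfl
  | case4 parts l1 l2 l3 hnc h =>
    simp only [ne_eq, not_or, not_not] at h
    obtain ⟨h1, h2, h3⟩ := h
    subst h1; subst h2; subst h3
    rw [if_pos (by constructor <;> rfl)]
    have hz : rle ([] : List Char) = [] := rfl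
    rw [hz]
    simp [medParts]

-- A's range-fold equals medParts (only the lengths of the three block lists matter)
theorem foldA_eq (b1 b2 b3 : List (Char × Nat))
    (h2 : b1.length = b2.length) (h3 : b1.length = b3.length) :
    (List.range (b1.map Prod.fst).length).foldl (fun (acc : List String) i =>
      acc ++ [String.mk (PySem.List.pyRepeat [(b1.map Prod.fst).getD i ' ']
        ((PySem.List.sorted [(b1.map (fun p => (p.2 : Int))).getD i 0,
                             (b2.map (fun p => (p.2 : Int))).getD i 0,
                             (b3.map (fun p => (p.2 : Int))).getD i 0] (fun x => x) false).getD 1 0))]) []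
      = medParts b1 b2 b3 := by
  rw [PySem.List.foldl_append_singleton_eq_map]
  apply List.ext_getElem
  · simp [medParts]
    omega
  · intro i hi hi'
    simp only [List.nil_append, List.length_map, List.length_range] at hi
    simp only [List.nil_append, List.getElem_map, List.getElem_range, medParts,
      List.getElem_zip]
    rw [sorted_mid]
    rw [List.getD_eq_getElem _ _ (by simpa using hi),
        List.getD_eq_getElem _ _ (by simp; omega),
        List.getD_eq_getElem _ _ (by simp; omega),
        List.getD_eq_getElem _ _ (by simp; omega)]
    simp only [List.getElem_map]
    have hmed : ∀ p q r : Nat, max (min (p : Int) (q : Int)) (min (max (p : Int) (q : Int)) (r : Int))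
        = ((med3 p q r : Nat) : Int) := by
      intro p q r
      simp only [med3, Nat.cast_max, Nat.cast_min]
    rw [hmed, PySem.List.pyRepeat_singleton]
    simp

-- ===== VERDICT (by name: the statement is the Claim_ definition above) =====
theorem min_transformations_spec : Claim_equal_min_transformations := by
  intro s1 s2 s3 _
  unfold Spec_min_transformations min_transformations min_transformations_alt
  simp only [gcb_eq]
  rw [goB_eq]
  by_cases hc : ((rle s1.toList).map Prod.fst = (rle s2.toList).map Prod.fst ∧
      (rle s1.toList).map Prod.fst = (rle s3.toList).map Prod.fst)
  · rw [if_pos hc, if_neg (by simp only [ne_eq, not_or, not_not]; exact ⟨hc.1, hc.2⟩)]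
    rw [foldA_eq _ _ _ (by simpa using congrArg List.length hc.1)
          (by simpa using congrArg List.length hc.2)]
    simp
  · rw [if_neg hc, if_pos]
    tauto
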